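-- pv_equiv track=rewrite | github.com/ChanMeng666/juejin-algorithm-practice | problems/057-red-packet-three-way-split/solution.py | solution
-- ===== SOURCE A (Python) =====
-- def solution(redpacks):
--     n = len(redpacks)
--     # If there are fewer than 3 red packets, they cannot be split into three parts
--     if n < 3:
--         return 0
--
--     max_amount = 0
--     # Compute prefix sums for fast range sum calculations
--     prefix_sum = [0] * (n + 1)
--     for i in range(n):
--         prefix_sum[i + 1] = prefix_sum[i] + redpacks[i]
--
--     # Enumerate all possible cut positions
--     for i in range(n-2):  # Position of the first cut
--         first_sum = prefix_sum[i+1]  # Sum of the first part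
--
--         for j in range(i+1, n-1):  # Position of the second cut
--             third_sum = prefix_sum[n] - prefix_sum[j+1]  # Sum of the third part
--
--             # If the first and third parts are equal, consider the combination
--             if first_sum == third_sum:
--                 # If a larger sum is found, update max_amount
--                 if first_sum > max_amount:
--                     max_amount = first_sum
--
--             # Check if merging adjacent red packets can yield a larger sum
--             if i > 0 and first_sum + redpacks[i+1] == third_sum - redpacks[j+1]:
--                 max_amount = max(max_amount, first_sum + redpacks[i+1])
--
--     return max_amount
-- ===== SOURCE B (Python) =====
-- def solution(redpacks):
--     n = len(redpacks)
--     if n < 3: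
--         return 0
--     total = sum(redpacks)
--     best = 0
--     seen = set()
--     left = 0
--     # b is the index of the last element of the middle part's first candidate...
--     # For each second-cut position b (1 <= b <= n-2): third part is redpacks[b+1:],
--     # first part sum must appear among prefix sums p(1..b).
--     for b in range(1, n - 1):
--         left += redpacks[b - 1]      # left = p(b) = sum of first b elements
--         seen.add(left)               # seen = {p(1), ..., p(b)}
--         third = total - (left + redpacks[b])   # sum of redpacks[b+1:]
--         if third in seen and third > best:
--             best = third
--     return best
-- ===== Notes on version B (the rewrite author's own statement) =====
-- stated objective: faster
-- what changed: Replaces the quadratic double loop over both cut positions by a single left-to-right pass that maintains the set of prefix sums seen so far and, for each second cut, checks the suffix sum for membership in that set.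
import Mathlib
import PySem

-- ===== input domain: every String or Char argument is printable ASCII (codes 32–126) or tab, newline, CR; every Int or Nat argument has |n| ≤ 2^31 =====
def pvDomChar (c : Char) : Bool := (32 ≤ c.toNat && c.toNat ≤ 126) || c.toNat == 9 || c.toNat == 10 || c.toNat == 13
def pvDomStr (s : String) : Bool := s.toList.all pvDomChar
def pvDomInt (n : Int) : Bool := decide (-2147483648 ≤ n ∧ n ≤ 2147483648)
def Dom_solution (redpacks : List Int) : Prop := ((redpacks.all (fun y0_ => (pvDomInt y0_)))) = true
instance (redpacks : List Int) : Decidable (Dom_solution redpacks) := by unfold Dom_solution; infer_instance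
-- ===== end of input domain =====

-- B replaces A's O(n^2) double loop over cut pairs by one O(n) pass keeping the set of
-- prefix sums seen so far; return values proved equal on all inputs.


-- ===== PORT A =====
-- literal port of A: build the prefix-sum array by a loop, then enumerate both cut
-- positions with nested loops (all Python indices are in range, so getD is exact).
def solution (redpacks : List Int) : Int :=
  let n := redpacks.length
  if n < 3 then 0
  else
    let prefixSum : List Int :=
      (List.range n).foldl
        (fun ps i => ps.set (i + 1) (ps.getD i 0 + redpacks.getD i 0))
        (List.replicate (n + 1) 0)
    (List.range (n - 2)).foldl
      (fun acc i =>
        let firstSum := prefixSum.getD (i + 1) 0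
        (List.range' (i + 1) (n - 2 - i)).foldl
          (fun acc j =>
            let thirdSum := prefixSum.getD n 0 - prefixSum.getD (j + 1) 0
            let acc1 := if firstSum = thirdSum then
                          (if firstSum > acc then firstSum else acc) else acc
            if 0 < i ∧ firstSum + redpacks.getD (i + 1) 0
                        = thirdSum - redpacks.getD (j + 1) 0 then
              max acc1 (firstSum + redpacks.getD (i + 1) 0)
            else acc1)
          acc)
      0

-- ===== PORT B =====
-- literal port of B: one pass over the second cut b, state (best, seen, left).
def solution_alt (redpacks : List Int) : Int :=
  let n := redpacks.length
  if n < 3 then 0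
  else
    let total := redpacks.sum
    let st :=
      (List.range' 1 (n - 2)).foldl
        (fun (st : Int × PySem.Set Int × Int) b =>
          let left := st.2.2 + redpacks.getD (b - 1) 0
          let seen := PySem.Set.add st.2.1 left
          let third := total - (left + redpacks.getD b 0)
          let best := if third ∈ seen ∧ third > st.1 then third else st.1
          (best, seen, left))
        (0, PySem.Set.empty, 0)
    st.1

-- ===== PRECONDITION & SPEC =====
def Spec_solution (redpacks : List Int) (out : Int) : Prop := out = solution_alt redpacks
instance (redpacks : List Int) (out : Int) : Decidable (Spec_solution redpacks out) := by unfold Spec_solution; infer_instance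

-- ===== CLAIM (what is proved, stated in full; the proofs are below) =====
def Claim_equal_solution : Prop := ∀ (redpacks : List Int), Dom_solution redpacks → Spec_solution redpacks (solution redpacks)

-- ===== LEMMAS AND PROOFS =====

/-- sum of the first `k` elements (Python's `prefix_sum[k]`). -/
def pfx (r : List Int) (k : Nat) : Int := (r.take k).sum

/-- sum of the third part when the second cut is after index `b` (`total - prefix_sum[b+1]`). -/
def thrd (r : List Int) (b : Nat) : Int := r.sum - pfx r (b + 1)

/-- the candidate values A's inner-loop body maxes into the accumulator at pair (i, j). -/
def candsA (r : List Int) (i j : Nat) : List Int :=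
  (if pfx r (i + 1) = thrd r j then [pfx r (i + 1)] else []) ++
  (if 0 < i ∧ pfx r (i + 2) = r.sum - pfx r (j + 2) then [pfx r (i + 2)] else [])

/-- all candidate values A ever maxes into its accumulator. -/
def LA (r : List Int) : List Int :=
  (List.range (r.length - 2)).flatMap
    (fun i => (List.range' (i + 1) (r.length - 2 - i)).flatMap (candsA r i))

/-- B's candidate at second cut `b`: the third-part sum, if it occurs among `pfx 1..b`. -/
def cB (r : List Int) (b : Nat) : Option Int :=
  if thrd r b ∈ (List.range' 1 b).map (pfx r) then some (thrd r b) else none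

/-- all candidate values B ever maxes into `best`. -/
def LB (r : List Int) : List Int := (List.range' 1 (r.length - 2)).filterMap (cB r)

def sup (L : List Int) : Int := L.foldl max 0

theorem le_foldl_max_init (L : List Int) (a : Int) : a ≤ L.foldl max a := by
  induction L generalizing a with
  | nil => simp
  | cons x xs ih => simpa using le_trans (le_max_left a x) (ih (max a x))

theorem le_foldl_max_of_mem {L : List Int} {x : Int} (h : x ∈ L) (a : Int) :
    x ≤ L.foldl max a := by
  induction L generalizing a with
  | nil => simp at h
  | cons y ys ih =>
    rcases List.mem_cons.mp h with rfl | h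
    · simpa using le_trans (le_max_right a x) (le_foldl_max_init ys (max a x))
    · simpa using ih h (max a y)

theorem foldl_max_le {L : List Int} {m a : Int} (h0 : a ≤ m) (h : ∀ x ∈ L, x ≤ m) :
    L.foldl max a ≤ m := by
  induction L generalizing a with
  | nil => simpa using h0
  | cons y ys ih =>
    simpa using ih (max_le h0 (h y (List.mem_cons_self))) (fun x hx => h x (List.mem_cons_of_mem _ hx))

theorem sup_nonneg (L : List Int) : 0 ≤ sup L := le_foldl_max_init L 0

theorem le_sup_of_mem {L : List Int} {x : Int} (h : x ∈ L) : x ≤ sup L :=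
  le_foldl_max_of_mem h 0

theorem sup_eq_sup {L M : List Int} (h1 : ∀ x ∈ L, x ≤ sup M) (h2 : ∀ x ∈ M, x ≤ sup L) :
    sup L = sup M :=
  le_antisymm (foldl_max_le (sup_nonneg M) h1) (foldl_max_le (sup_nonneg L) h2)

theorem foldl_max_flatMap {α : Type} (xs : List α) (c : α → List Int) (a : Int) :
    (xs.flatMap c).foldl max a = xs.foldl (fun acc x => (c x).foldl max acc) a := by
  induction xs generalizing a with
  | nil => rfl
  | cons x xs ih => simp [List.foldl_append, ih]

theorem pfx_succ (r : List Int) (k : Nat) (h : k < r.length) :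
    pfx r (k + 1) = pfx r k + r.getD k 0 := by
  unfold pfx
  rw [List.sum_take_succ r k h, List.getD_eq_getElem?_getD, List.getElem?_eq_getElem h]
  rfl

theorem pfx_length (r : List Int) : pfx r r.length = r.sum := by simp [pfx]

/-- the prefix-sum array A builds: length and contents. -/
theorem build_spec (r : List Int) (m : Nat) (hm : m ≤ r.length) :
    ((List.range m).foldl
        (fun ps i => ps.set (i + 1) (ps.getD i 0 + r.getD i 0))
        (List.replicate (r.length + 1) 0)).length = r.length + 1 ∧
    ∀ k, k ≤ m →
      ((List.range m).foldl
          (fun ps i => ps.set (i + 1) (ps.getD i 0 + r.getD i 0))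
          (List.replicate (r.length + 1) 0)).getD k 0 = pfx r k := by
  induction m with
  | zero =>
    refine ⟨by simp, ?_⟩
    intro k hk
    interval_cases k
    simp [pfx]
  | succ m ih =>
    obtain ⟨ihlen, ihval⟩ := ih (by omega)
    rw [List.range_succ, List.foldl_append]
    refine ⟨by simpa using ihlen, ?_⟩
    intro k hk
    simp only [List.foldl_cons, List.foldl_nil]
    rw [ihval m (le_refl m)]
    rw [List.getD_eq_getElem?_getD, List.getElem?_set]
    by_cases hkm : k = m + 1
    · subst hkm
      rw [if_pos rfl, if_pos (by omega), Option.getD_some, pfx_succ r m (by omega)]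
    · rw [if_neg (by omega), ← List.getD_eq_getElem?_getD]
      exact ihval k (by omega)


/-- A's inner-loop body maxes exactly `candsA i j` into the accumulator. -/
theorem bodyA (r : List Int) (i j : Nat) (hn : 3 ≤ r.length)
    (hj1 : i + 1 ≤ j) (hj2 : j < r.length - 1) (acc : Int) :
    (let acc1 := if pfx r (i + 1) = r.sum - pfx r (j + 1) then
                   (if pfx r (i + 1) > acc then pfx r (i + 1) else acc) else acc;
     if 0 < i ∧ pfx r (i + 1) + r.getD (i + 1) 0
                 = r.sum - pfx r (j + 1) - r.getD (j + 1) 0 then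
       max acc1 (pfx r (i + 1) + r.getD (i + 1) 0)
     else acc1)
    = (candsA r i j).foldl max acc := by
  have e1 : pfx r (i + 1) + r.getD (i + 1) 0 = pfx r (i + 2) :=
    (pfx_succ r (i + 1) (by omega)).symm
  have e2 : r.sum - pfx r (j + 1) - r.getD (j + 1) 0 = r.sum - pfx r (j + 2) := by
    rw [pfx_succ r (j + 1) (by omega)]; ring
  rw [e1, e2]
  unfold candsA thrd
  split_ifs <;> simp_all [List.foldl] <;> omega

/-- A computes the max of 0 and all its candidates. -/
theorem solution_eq_sup (r : List Int) (hn : 3 ≤ r.length) : solution r = sup (LA r) := by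
  obtain ⟨hlen, hval⟩ := build_spec r r.length (le_refl _)
  unfold solution LA sup
  rw [if_neg (by omega), foldl_max_flatMap]
  refine PySem.List.foldl_congr_mem _ _ _ _ ?_
  intro acc i hi
  rw [foldl_max_flatMap]
  refine PySem.List.foldl_congr_mem _ _ _ _ ?_
  intro acc2 j hj
  simp only [List.mem_range] at hi
  simp only [List.mem_range'_1] at hj
  rw [hval (i + 1) (by omega), hval r.length (le_refl _), hval (j + 1) (by omega),
    pfx_length]
  exact bodyA r i j hn hj.1 (by omega) acc2

theorem sup_append_singleton (L : List Int) (x : Int) :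
    sup (L ++ [x]) = max (sup L) x := by
  simp [sup, List.foldl_append]

theorem ofList_append_singleton (l : List Int) (x : Int) :
    PySem.Set.ofList (l ++ [x]) = PySem.Set.add (PySem.Set.ofList l) x := by
  simp [PySem.Set.ofList_eq_foldl, List.foldl_append]

/-- B computes the max of 0 and all its candidates (loop invariant). -/
theorem alt_fold (r : List Int) (hn : 3 ≤ r.length) (m : Nat) (hm : m ≤ r.length - 2) :
    (List.range' 1 m).foldl
        (fun (st : Int × PySem.Set Int × Int) b =>
          let left := st.2.2 + r.getD (b - 1) 0
          let seen := PySem.Set.add st.2.1 left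
          let third := r.sum - (left + r.getD b 0)
          let best := if third ∈ seen ∧ third > st.1 then third else st.1
          (best, seen, left))
        (0, PySem.Set.empty, 0)
    = (sup ((List.range' 1 m).filterMap (cB r)),
       PySem.Set.ofList ((List.range' 1 m).map (pfx r)),
       pfx r m) := by
  induction m with
  | zero => rfl
  | succ m ih =>
    have hone : (1 : Nat) + m = m + 1 := by omega
    rw [List.range'_1_concat, hone, List.foldl_append, List.filterMap_append, List.map_append,
      ih (by omega)]
    simp only [List.foldl_cons, List.foldl_nil]
    have hleft : pfx r m + r.getD (m + 1 - 1) 0 = pfx r (m + 1) := by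
      rw [show m + 1 - 1 = m from rfl]; exact (pfx_succ r m (by omega)).symm
    have hthird : r.sum - (pfx r (m + 1) + r.getD (m + 1) 0) = thrd r (m + 1) := by
      rw [thrd, pfx_succ r (m + 1) (by omega)]
    have hseen : PySem.Set.add (PySem.Set.ofList ((List.range' 1 m).map (pfx r)))
        (pfx r (m + 1))
        = PySem.Set.ofList ((List.range' 1 m).map (pfx r) ++ List.map (pfx r) [m + 1]) := by
      rw [show List.map (pfx r) [m + 1] = [pfx r (m + 1)] from rfl, ofList_append_singleton]
    simp only [hleft, hthird, hseen]
    refine Prod.ext ?_ (Prod.ext rfl rfl)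
    have hmem : thrd r (m + 1) ∈ PySem.Set.ofList
          ((List.range' 1 m).map (pfx r) ++ List.map (pfx r) [m + 1])
        ↔ thrd r (m + 1) ∈ (List.range' 1 (m + 1)).map (pfx r) := by
      rw [PySem.Set.mem_ofList, List.range'_1_concat, List.map_append, hone]
    by_cases hc : thrd r (m + 1) ∈ (List.range' 1 (m + 1)).map (pfx r)
    · have hfm : List.filterMap (cB r) [m + 1] = [thrd r (m + 1)] := by
        simp [cB, hc]
      rw [hfm, sup_append_singleton, if_congr (and_congr_left' hmem) rfl rfl]
      by_cases hgt : thrd r (m + 1) > sup ((List.range' 1 m).filterMap (cB r)) <;>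
        simp only [hc, hgt, and_true, true_and, if_true, if_false] <;> omega
    · have hfm : List.filterMap (cB r) [m + 1] = [] := by
        simp [cB, hc]
      rw [hfm, List.append_nil, if_congr (and_congr_left' hmem) rfl rfl, if_neg]
      simp [hc]

theorem solution_alt_eq_sup (r : List Int) (hn : 3 ≤ r.length) :
    solution_alt r = sup (LB r) := by
  unfold solution_alt LB
  rw [if_neg (by omega)]
  simp only [alt_fold r hn (r.length - 2) (le_refl _)]

/-- every candidate of A is bounded by B's maximum. -/
theorem la_le (r : List Int) (hn : 3 ≤ r.length) : ∀ x ∈ LA r, x ≤ sup (LB r) := by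
  intro x hx
  simp only [LA, List.mem_flatMap, List.mem_range, List.mem_range'_1] at hx
  obtain ⟨i, hi, j, hj, hx⟩ := hx
  rw [candsA, List.mem_append] at hx
  rcases hx with hx | hx
  · by_cases hc : pfx r (i + 1) = thrd r j
    swap
    · simp [hc] at hx
    rw [if_pos hc, List.mem_singleton] at hx
    subst hx
    apply le_sup_of_mem
    rw [LB, List.mem_filterMap]
    refine ⟨j, by rw [List.mem_range'_1]; omega, ?_⟩
    rw [cB, if_pos, hc]
    rw [← hc, List.mem_map]
    exact ⟨i + 1, by rw [List.mem_range'_1]; omega, rfl⟩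
  · by_cases hc : 0 < i ∧ pfx r (i + 2) = r.sum - pfx r (j + 2)
    swap
    · simp [hc] at hx
    rw [if_pos hc, List.mem_singleton] at hx
    subst hx
    by_cases hj3 : j + 3 ≤ r.length
    · -- the shifted pair (i+1, j+1) is one of B's candidates
      apply le_sup_of_mem
      rw [LB, List.mem_filterMap]
      refine ⟨j + 1, by rw [List.mem_range'_1]; omega, ?_⟩
      have ht : thrd r (j + 1) = pfx r (i + 2) := by rw [thrd, hc.2]
      rw [cB, if_pos, ht]
      rw [ht, List.mem_map]
      exact ⟨i + 2, by rw [List.mem_range'_1]; omega, rfl⟩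
    · -- j = n - 2: the third part would be empty, the candidate is 0
      have hj2 : j + 2 = r.length := by omega
      have : pfx r (i + 2) = 0 := by
        rw [hc.2, hj2, pfx_length]; ring
      rw [this]
      exact sup_nonneg _

/-- every candidate of B is one of A's candidates. -/
theorem lb_le (r : List Int) (hn : 3 ≤ r.length) : ∀ x ∈ LB r, x ≤ sup (LA r) := by
  intro x hx
  simp only [LB, List.mem_filterMap] at hx
  obtain ⟨b, hb, hcb⟩ := hx
  rw [List.mem_range'_1] at hb
  rw [cB] at hcb
  by_cases hc : thrd r b ∈ (List.range' 1 b).map (pfx r)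
  swap
  · rw [if_neg hc] at hcb; exact absurd hcb (by simp)
  rw [if_pos hc, Option.some_inj] at hcb
  subst hcb
  obtain ⟨a, ha, hpa⟩ := List.mem_map.mp hc
  rw [List.mem_range'_1] at ha
  apply le_sup_of_mem
  simp only [LA, List.mem_flatMap, List.mem_range, List.mem_range'_1]
  refine ⟨a - 1, by omega, b, by constructor <;> omega, ?_⟩
  have ha1 : a - 1 + 1 = a := by omega
  rw [candsA, List.mem_append, ha1]
  left
  rw [if_pos hpa, hpa, List.mem_singleton]

-- ===== VERDICT (by name: the statement is the Claim_ definition above) =====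
theorem solution_spec : Claim_equal_solution := by
  intro r _
  unfold Spec_solution
  by_cases hn : r.length < 3
  · unfold solution solution_alt
    rw [if_pos hn, if_pos hn]
  · have hn' : 3 ≤ r.length := by omega
    rw [solution_eq_sup r hn', solution_alt_eq_sup r hn']
    exact sup_eq_sup (la_le r hn') (lb_le r hn')
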